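-- pv_equiv track=rewrite | github.com/kh1tko/Scientific-Computing | task for certification/task_1.py | arithmetic_arranger
-- ===== SOURCE A (Python) =====
-- def arithmetic_arranger(problems, show_answers=False):
--     if len(problems) > 5:
--         return 'Error: Too many problems.'
--
--     first_operands = []
--     second_operands = []
--     lines = []
--     results = []
--
--     for problem in problems:
--         parts = problem.split()
--         if len(parts) != 3:
--             return 'Error: Each problem must have two operands and one operator.'
--
--         operand1, operator, operand2 = parts
--
--         if operator not in ['+', '-']:
--             return "Error: Operator must be '+' or '-'."
--
--         if not operand1.isdigit() or not operand2.isdigit():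
--             return 'Error: Numbers must only contain digits.'
--
--         if len(operand1) > 4 or len(operand2) > 4:
--             return 'Error: Numbers cannot be more than four digits.'
--
--         result = None
--         if operator == '+':
--             result = int(operand1) + int(operand2)
--         else:
--             result = int(operand1) - int(operand2)
--
--         width = max(len(operand1), len(operand2)) + 2
--         first_operands.append(operand1.rjust(width))
--         second_operands.append(operator + operand2.rjust(width - 1))
--         lines.append('-' * width)
--         results.append(str(result).rjust(width))
--
--     arranged_problems = '    '.join(first_operands) + '\n'
--     arranged_problems += '    '.join(second_operands) + '\n'
--     arranged_problems += '    '.join(lines)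
--     if show_answers:
--         arranged_problems += '\n' + '    '.join(results)
--
--     return arranged_problems
-- ===== SOURCE B (Python) =====
-- def _block(problem, show_answers):
--     """Render one problem as its own vertical block of rows, or an error string."""
--     parts = problem.split()
--     if len(parts) != 3:
--         return 'Error: Each problem must have two operands and one operator.'
--     op1, operator, op2 = parts
--     if operator not in ('+', '-'):
--         return "Error: Operator must be '+' or '-'."
--     if not (op1.isdigit() and op2.isdigit()):
--         return 'Error: Numbers must only contain digits.'
--     if len(op1) > 4 or len(op2) > 4:
--         return 'Error: Numbers cannot be more than four digits.'
--     w = max(len(op1), len(op2)) + 2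
--     rows = [op1.rjust(w), operator + op2.rjust(w - 1), '-' * w]
--     if show_answers:
--         value = int(op1) + int(op2) if operator == '+' else int(op1) - int(op2)
--         rows.append(str(value).rjust(w))
--     return rows
--
--
-- def arithmetic_arranger(problems, show_answers=False):
--     if len(problems) > 5:
--         return 'Error: Too many problems.'
--     out = None
--     for problem in problems:
--         block = _block(problem, show_answers)
--         if isinstance(block, str):
--             return block
--         out = block if out is None else [l + '    ' + r for l, r in zip(out, block)]
--     if out is None:
--         out = ['', '', ''] + ([''] if show_answers else [])
--     return '\n'.join(out)
-- ===== Notes on version B (the rewrite author's own statement) =====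
-- stated objective: alternative
-- what changed: A maintains four parallel column accumulators across one loop and joins each row list at the end; B renders each problem as its own self-contained vertical block of 3-4 row strings and horizontally merges blocks pairwise with a zip-fold ('l + " " + r' per row), so no global row accumulators exist.
import Mathlib
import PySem

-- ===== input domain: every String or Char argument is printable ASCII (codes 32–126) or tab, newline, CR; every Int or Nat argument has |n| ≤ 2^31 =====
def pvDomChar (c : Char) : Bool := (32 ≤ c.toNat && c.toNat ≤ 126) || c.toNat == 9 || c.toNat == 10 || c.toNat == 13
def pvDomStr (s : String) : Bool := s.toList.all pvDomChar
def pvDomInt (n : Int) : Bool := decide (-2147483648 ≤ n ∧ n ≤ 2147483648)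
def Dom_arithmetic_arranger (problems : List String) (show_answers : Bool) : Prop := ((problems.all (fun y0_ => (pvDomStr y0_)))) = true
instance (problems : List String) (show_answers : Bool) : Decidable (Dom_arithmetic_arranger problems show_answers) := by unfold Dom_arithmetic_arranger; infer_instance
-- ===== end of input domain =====

-- B replaces A's four global parallel column accumulators by per-problem vertical blocks merged horizontally with a zip-fold; return value proved equal (no side effects involved).

-- shared primitive wrappers (builtins PySem does not provide directly)
-- s.rjust(w) for the nonnegative widths used here: left-pad with spaces (exact for w ≥ 0)
def pyRjust (cs : List Char) (w : Nat) : List Char := List.replicate (w - cs.length) ' ' ++ cs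
-- int(s) under a guard guaranteeing s is all digits (so ofChars? is always some here)
def pyInt (cs : List Char) : Int := (PySem.Int.ofChars? cs).getD 0

-- ===== PORT A =====
-- the for-loop of A: four parallel accumulators, early return of the first error
def arrangeA (show_answers : Bool) (probs : List String)
    (fo so ln rs : List (List Char)) : String :=
  match probs with
  | [] =>
    let s := PySem.Chars.join "    ".toList fo ++ "\n".toList
             ++ PySem.Chars.join "    ".toList so ++ "\n".toList
             ++ PySem.Chars.join "    ".toList ln
    String.mk (if show_answers then s ++ "\n".toList ++ PySem.Chars.join "    ".toList rs else s)
  | p :: rest =>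
    let parts := PySem.Chars.split₀ p.toList
    if parts.length ≠ 3 then "Error: Each problem must have two operands and one operator."
    else
      match parts with
      | [op1, opr, op2] =>
        if ¬ (opr = "+".toList ∨ opr = "-".toList) then "Error: Operator must be '+' or '-'."
        else if !PySem.Chars.strIsdigit op1 || !PySem.Chars.strIsdigit op2 then
          "Error: Numbers must only contain digits."
        else if op1.length > 4 ∨ op2.length > 4 then
          "Error: Numbers cannot be more than four digits."
        else
          let result : Int := if opr = "+".toList then pyInt op1 + pyInt op2 else pyInt op1 - pyInt op2
          let width := max op1.length op2.length + 2
          arrangeA show_answers rest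
            (fo ++ [pyRjust op1 width])
            (so ++ [opr ++ pyRjust op2 (width - 1)])
            (ln ++ [List.replicate width '-'])
            (rs ++ [pyRjust (PySem.Int.toChars result) width])
      | _ => "Error: Each problem must have two operands and one operator."

def arithmetic_arranger (problems : List String) (show_answers : Bool) : String :=
  if problems.length > 5 then "Error: Too many problems."
  else arrangeA show_answers problems [] [] [] []

-- ===== PORT B =====
-- _block: one problem rendered as its own vertical block of rows, or the first matching error
def blockB (show_answers : Bool) (p : String) : String ⊕ List (List Char) :=
  let parts := PySem.Chars.split₀ p.toList
  if parts.length ≠ 3 then .inl "Error: Each problem must have two operands and one operator."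
  else
    match parts with
    | [op1, opr, op2] =>
      if ¬ (opr = "+".toList ∨ opr = "-".toList) then .inl "Error: Operator must be '+' or '-'."
      else if !(PySem.Chars.strIsdigit op1 && PySem.Chars.strIsdigit op2) then
        .inl "Error: Numbers must only contain digits."
      else if op1.length > 4 ∨ op2.length > 4 then
        .inl "Error: Numbers cannot be more than four digits."
      else
        let w := max op1.length op2.length + 2
        let rows := [pyRjust op1 w, opr ++ pyRjust op2 (w - 1), List.replicate w '-']
        .inr (if show_answers then
          rows ++ [pyRjust (PySem.Int.toChars
            (if opr = "+".toList then pyInt op1 + pyInt op2 else pyInt op1 - pyInt op2)) w]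
        else rows)
    | _ => .inl "Error: Each problem must have two operands and one operator."

-- 'out = block if out is None else [l + "    " + r for l, r in zip(out, block)]'
def mergeB (out : Option (List (List Char))) (blk : List (List Char)) : List (List Char) :=
  match out with
  | none => blk
  | some rows => (rows.zip blk).map (fun q => q.1 ++ "    ".toList ++ q.2)

-- B's loop: fold over the problems, stopping at the first error
def loopB (show_answers : Bool) (probs : List String) (out : Option (List (List Char))) :
    String ⊕ Option (List (List Char)) :=
  match probs with
  | [] => .inr out
  | p :: rest =>
    match blockB show_answers p with
    | .inl e => .inl e
    | .inr blk => loopB show_answers rest (some (mergeB out blk))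

def arithmetic_arranger_alt (problems : List String) (show_answers : Bool) : String :=
  if problems.length > 5 then "Error: Too many problems."
  else
    match loopB show_answers problems none with
    | .inl e => e
    | .inr out =>
      let rows := out.getD ([[], [], []] ++ (if show_answers then [[]] else []))
      String.mk (PySem.Chars.join "\n".toList rows)

-- ===== PRECONDITION & SPEC =====
def Spec_arithmetic_arranger (problems : List String) (show_answers : Bool) (out : String) : Prop := out = arithmetic_arranger_alt problems show_answers
instance (problems : List String) (show_answers : Bool) (out : String) : Decidable (Spec_arithmetic_arranger problems show_answers out) := by unfold Spec_arithmetic_arranger; infer_instance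

-- ===== CLAIM (what is proved, stated in full; the proofs are below) =====
def Claim_equal_arithmetic_arranger : Prop := ∀ (problems : List String) (show_answers : Bool), Dom_arithmetic_arranger problems show_answers → Spec_arithmetic_arranger problems show_answers (arithmetic_arranger problems show_answers)

-- ===== LEMMAS AND PROOFS =====

-- projections of a triple to the four padded column cells
def wOf (t : List Char × List Char × List Char) : Nat := max t.1.length t.2.2.length + 2
def f1 (t : List Char × List Char × List Char) : List Char := pyRjust t.1 (wOf t)
def f2 (t : List Char × List Char × List Char) : List Char := t.2.1 ++ pyRjust t.2.2 (wOf t - 1)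
def f3 (t : List Char × List Char × List Char) : List Char := List.replicate (wOf t) '-'
def f4 (t : List Char × List Char × List Char) : List Char :=
  pyRjust (PySem.Int.toChars (if t.2.1 = "+".toList then pyInt t.1 + pyInt t.2.2 else pyInt t.1 - pyInt t.2.2)) (wOf t)

-- the block B builds for a valid triple
def blkOf (show_answers : Bool) (t : List Char × List Char × List Char) : List (List Char) :=
  [f1 t, f2 t, f3 t] ++ (if show_answers then [f4 t] else [])

-- the rows corresponding to A's four accumulators after processing 'acc'
def rowsOf (show_answers : Bool) (acc : List (List Char × List Char × List Char)) : List (List Char) :=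
  [PySem.Chars.join "    ".toList (acc.map f1),
   PySem.Chars.join "    ".toList (acc.map f2),
   PySem.Chars.join "    ".toList (acc.map f3)] ++
  (if show_answers then [PySem.Chars.join "    ".toList (acc.map f4)] else [])

-- the Option state of B's loop corresponding to 'acc'
def stateOf (show_answers : Bool) (acc : List (List Char × List Char × List Char)) :
    Option (List (List Char)) :=
  if acc = [] then none else some (rowsOf show_answers acc)

theorem join_snoc (sep : List Char) (xs : List (List Char)) (x : List Char) (h : xs ≠ []) :
    PySem.Chars.join sep (xs ++ [x]) = PySem.Chars.join sep xs ++ sep ++ x := by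
  induction xs with
  | nil => exact absurd rfl h
  | cons a as ih =>
    cases as with
    | nil => simp [PySem.Chars.join_cons_cons, PySem.Chars.join_singleton]
    | cons b bs =>
      have := ih (by simp)
      simp only [List.cons_append, PySem.Chars.join_cons_cons] at *
      simp [this, List.append_assoc]

theorem merge_snoc (show_answers : Bool) (acc : List (List Char × List Char × List Char))
    (t : List Char × List Char × List Char) :
    mergeB (stateOf show_answers acc) (blkOf show_answers t) = rowsOf show_answers (acc ++ [t]) := by
  by_cases h : acc = []
  · subst h
    cases show_answers <;>
      simp [stateOf, mergeB, blkOf, rowsOf, PySem.Chars.join_singleton]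
  · have j1 := join_snoc "    ".toList (acc.map f1) (f1 t) (by simpa using h)
    have j2 := join_snoc "    ".toList (acc.map f2) (f2 t) (by simpa using h)
    have j3 := join_snoc "    ".toList (acc.map f3) (f3 t) (by simpa using h)
    have j4 := join_snoc "    ".toList (acc.map f4) (f4 t) (by simpa using h)
    have hsep : "    ".toList = [' ', ' ', ' ', ' '] := rfl
    rw [hsep] at j1 j2 j3 j4
    cases show_answers <;>
      simp [stateOf, h, mergeB, blkOf, rowsOf, j1, j2, j3, j4, List.zip, List.append_assoc]

theorem key (show_answers : Bool) (probs : List String) :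
    ∀ acc, arrangeA show_answers probs (acc.map f1) (acc.map f2) (acc.map f3) (acc.map f4) =
      (match loopB show_answers probs (stateOf show_answers acc) with
       | .inl e => e
       | .inr out =>
         String.mk (PySem.Chars.join "\n".toList
           (out.getD ([[], [], []] ++ (if show_answers then [[]] else []))))) := by
  induction probs with
  | nil =>
    intro acc
    by_cases h : acc = []
    · subst h
      cases show_answers <;>
        simp [arrangeA, loopB, stateOf, PySem.Chars.join_cons_cons, PySem.Chars.join_singleton,
          PySem.Chars.join_nil]
    · cases show_answers <;>
        simp [arrangeA, loopB, stateOf, h, rowsOf, PySem.Chars.join_cons_cons,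
          PySem.Chars.join_singleton, List.append_assoc]
  | cons p rest ih =>
    intro acc
    simp only [loopB, arrangeA, blockB]
    rcases hp : PySem.Chars.split₀ p.toList with _ | ⟨a, _ | ⟨b, _ | ⟨c, _ | ⟨d, l⟩⟩⟩⟩ <;>
      simp only [hp] <;> try norm_num
    -- the three-part case [a, b, c]
    have H := ih (acc ++ [(a, b, c)])
    have hst : stateOf show_answers (acc ++ [(a, b, c)]) =
        some (mergeB (stateOf show_answers acc) (blkOf show_answers (a, b, c))) := by
      rw [merge_snoc]; simp [stateOf]
    rw [hst] at H
    simp only [List.map_append, List.map_cons, List.map_nil, f1, f2, f3, f4, wOf] at H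
    have e1 : "+".toList = ['+'] := rfl
    have e2 : "-".toList = ['-'] := rfl
    simp only [e1, e2] at H ⊢
    by_cases hop : b = ['+'] ∨ b = ['-']
    · rcases hop with h | h <;> subst h <;>
        cases hda : PySem.Chars.strIsdigit a <;> cases hdc : PySem.Chars.strIsdigit c <;>
        by_cases hl : a.length > 4 ∨ c.length > 4 <;>
        cases show_answers <;>
        simp only [blkOf, f1, f2, f3, f4, wOf] at H <;>
        simp [hda, hdc, hl, e1, e2] <;>
        simpa using H
    · have h1 : ¬ b = ['+'] := fun h => hop (Or.inl h)
      have h2 : ¬ b = ['-'] := fun h => hop (Or.inr h)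
      simp [h1, h2]

-- ===== VERDICT (by name: the statement is the Claim_ definition above) =====
theorem arithmetic_arranger_spec : Claim_equal_arithmetic_arranger := by
  intro problems show_answers _
  unfold Spec_arithmetic_arranger arithmetic_arranger arithmetic_arranger_alt
  by_cases h : problems.length > 5
  · simp [h]
  · simp only [h, if_false, ite_false]
    have := key show_answers problems []
    simpa [stateOf] using this
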